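-- pv_equiv track=rewrite | github.com/freedom-zjw/JPEG_python | JPEG/tools/Sample.py | Inverse_sample
-- ===== SOURCE A (Python) =====
-- def Inverse_sample(matrix, size):
--     """
--     解除采样
--     将原先每个2*2的小矩形的4个单元都填入原左上角的那个值
--     """
--     temp = []
--     for X in range(0, size[0]):
--         for i in range(0, 2): # X为采样后的矩形的行数，对于一个值要连续填充两行，用i来枚举
--             for Y in range(0, size[1]): # 枚举一行中的每一列
--                 idx = X * size[1] + Y  # 原左上角的值在采样后的矩阵里的索引
--                 temp.append(matrix[idx])  #填充两次达到填充了相邻两列的目的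
--                 temp.append(matrix[idx])
--     return temp
-- ===== SOURCE B (Python) =====
-- def Inverse_sample(matrix, size):
--     rows, cols = size
--     w = 2 * cols
--     return [matrix[(i // w // 2) * cols + (i % w) // 2] for i in range(4 * rows * cols)]
-- ===== Notes on version B (the rewrite author's own statement) =====
-- stated objective: alternative
-- what changed: Replaces A's push-based triple nested loop (append every source value twice, twice per row) by a pull-based closed form: one flat comprehension over all 4*rows*cols output positions that computes each position's source index arithmetically (i // (2*cols) // 2)*cols + (i % (2*cols)) // 2.
-- outside the precondition, e.g. on Inverse_sample([1, 2], (-1, -1)): A returns [], B returns [1, 1, 2, 1]; on Inverse_sample([1, 2], (-2, -1)): A returns [], B raises IndexError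
import Mathlib
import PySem

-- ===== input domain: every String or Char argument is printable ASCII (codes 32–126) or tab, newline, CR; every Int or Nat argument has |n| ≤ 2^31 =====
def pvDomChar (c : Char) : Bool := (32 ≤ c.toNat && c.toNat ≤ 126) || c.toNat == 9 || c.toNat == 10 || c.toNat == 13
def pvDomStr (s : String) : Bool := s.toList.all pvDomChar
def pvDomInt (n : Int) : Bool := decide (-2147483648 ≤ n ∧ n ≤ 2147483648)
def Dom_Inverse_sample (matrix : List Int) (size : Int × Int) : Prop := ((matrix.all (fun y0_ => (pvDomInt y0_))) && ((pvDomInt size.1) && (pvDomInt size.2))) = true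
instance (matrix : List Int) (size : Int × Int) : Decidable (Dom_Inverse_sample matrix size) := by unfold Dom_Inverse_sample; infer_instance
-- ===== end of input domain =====

-- B replaces A's push-based triple nested loop by a pull-based closed form: one flat pass over
-- all 4*rows*cols output positions, each computing its source index arithmetically
-- (objective: alternative algorithmic decomposition, same cost).

-- ===== PORT A =====
def Inverse_sample (matrix : List Int) (size : Int × Int) : List Int :=
  (PySem.List.pyRange 0 size.1 1).foldl (fun temp X =>
    (PySem.List.pyRange 0 2 1).foldl (fun temp _i =>
      (PySem.List.pyRange 0 size.2 1).foldl (fun temp Y =>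
        let idx := X * size.2 + Y
        ((temp ++ [(PySem.List.pyGet? matrix idx).getD 0]) ++ [(PySem.List.pyGet? matrix idx).getD 0])) temp) temp) []

-- ===== PORT B =====
def Inverse_sample_alt (matrix : List Int) (size : Int × Int) : List Int :=
  let rows := size.1
  let cols := size.2
  let w := 2 * cols
  (PySem.List.pyRange 0 (4 * rows * cols) 1).map (fun i =>
    (PySem.List.pyGet? matrix
      (PySem.Int.floordiv (PySem.Int.floordiv i w) 2 * cols +
       PySem.Int.floordiv (PySem.Int.mod i w) 2)).getD 0)

-- ===== PRECONDITION & SPEC =====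
-- Pre_ excludes the both-negative size quadrant (outside the task's natural domain; A's empty
-- result there is an accident of its empty ranges, while B's positive 4*rows*cols makes it index)
-- and the shapes on which A raises IndexError (positive area exceeding the flat matrix length).
def Pre_Inverse_sample (matrix : List Int) (size : Int × Int) : Prop :=
  ¬ (size.1 < 0 ∧ size.2 < 0) ∧
  (size.1 ≤ 0 ∨ size.2 ≤ 0 ∨ size.1 * size.2 ≤ (matrix.length : Int))
instance (matrix : List Int) (size : Int × Int) : Decidable (Pre_Inverse_sample matrix size) := by
  unfold Pre_Inverse_sample; infer_instance

def pvWitness_Inverse_sample : List Int × (Int × Int) := ([1, 2, 3, 4, 5, 6], (3, 2))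

def Spec_Inverse_sample (matrix : List Int) (size : Int × Int) (out : List Int) : Prop := out = Inverse_sample_alt matrix size
instance (matrix : List Int) (size : Int × Int) (out : List Int) : Decidable (Spec_Inverse_sample matrix size out) := by unfold Spec_Inverse_sample; infer_instance

-- ===== CLAIM (what is proved, stated in full; the proofs are below) =====
def Claim_equal_Inverse_sample : Prop := ∀ (matrix : List Int) (size : Int × Int), Dom_Inverse_sample matrix size → Pre_Inverse_sample matrix size → Spec_Inverse_sample matrix size (Inverse_sample matrix size)

-- ===== LEMMAS AND PROOFS =====

-- A's row block over Int indices: the inner Y-loop appends each addressed element twice.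
def pvRowA (matrix : List Int) (c X : Int) : List Int :=
  (PySem.List.pyRange 0 c 1).flatMap (fun Y =>
    [(PySem.List.pyGet? matrix (X * c + Y)).getD 0, (PySem.List.pyGet? matrix (X * c + Y)).getD 0])

-- the same row block with Nat indices
def pvRowN (m : List Int) (c X : Nat) : List Int :=
  (List.range c).flatMap (fun Y => [m.getD (X * c + Y) 0, m.getD (X * c + Y) 0])

lemma pvA_flat (matrix : List Int) (size : Int × Int) :
    Inverse_sample matrix size =
      (PySem.List.pyRange 0 size.1 1).flatMap
        (fun X => pvRowA matrix size.2 X ++ pvRowA matrix size.2 X) := by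
  unfold Inverse_sample
  have hbody : ∀ (temp : List Int) (X : Int),
      (PySem.List.pyRange 0 2 1).foldl (fun temp _i =>
        (PySem.List.pyRange 0 size.2 1).foldl (fun temp Y =>
          ((temp ++ [(PySem.List.pyGet? matrix (X * size.2 + Y)).getD 0])
            ++ [(PySem.List.pyGet? matrix (X * size.2 + Y)).getD 0])) temp) temp
      = temp ++ (pvRowA matrix size.2 X ++ pvRowA matrix size.2 X) := by
    intro temp X
    have hy : ∀ (t : List Int),
        (PySem.List.pyRange 0 size.2 1).foldl (fun t Y =>
          ((t ++ [(PySem.List.pyGet? matrix (X * size.2 + Y)).getD 0])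
            ++ [(PySem.List.pyGet? matrix (X * size.2 + Y)).getD 0])) t
        = t ++ pvRowA matrix size.2 X := by
      intro t
      have := PySem.List.foldl_append_eq_flatMap
        (g := fun Y => [(PySem.List.pyGet? matrix (X * size.2 + Y)).getD 0,
                        (PySem.List.pyGet? matrix (X * size.2 + Y)).getD 0])
        (l := PySem.List.pyRange 0 size.2 1) (acc := t)
      simpa [pvRowA, List.append_assoc] using this
    have h2 : PySem.List.pyRange 0 2 1 = [0, 1] := by decide
    rw [h2]
    simp only [List.foldl_cons, List.foldl_nil]
    rw [hy, hy, List.append_assoc]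
  calc (PySem.List.pyRange 0 size.1 1).foldl (fun temp X =>
        (PySem.List.pyRange 0 2 1).foldl (fun temp _i =>
          (PySem.List.pyRange 0 size.2 1).foldl (fun temp Y =>
            ((temp ++ [(PySem.List.pyGet? matrix (X * size.2 + Y)).getD 0])
              ++ [(PySem.List.pyGet? matrix (X * size.2 + Y)).getD 0])) temp) temp) []
      = (PySem.List.pyRange 0 size.1 1).foldl
          (fun temp X => temp ++ (pvRowA matrix size.2 X ++ pvRowA matrix size.2 X)) [] := by
        apply PySem.List.foldl_congr_mem
        intro acc X _; exact hbody acc X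
    _ = _ := by
        simpa using PySem.List.foldl_append_eq_flatMap
          (g := fun X => pvRowA matrix size.2 X ++ pvRowA matrix size.2 X)
          (l := PySem.List.pyRange 0 size.1 1) (acc := [])

-- Nat-indexed form of A
lemma pvA_flatN (m : List Int) (r c : Nat) :
    Inverse_sample m ((r : Int), (c : Int)) =
      (List.range r).flatMap (fun X => pvRowN m c X ++ pvRowN m c X) := by
  rw [pvA_flat]
  have hrow : ∀ X : Nat, pvRowA m (c : Int) (X : Int) = pvRowN m c X := by
    intro X
    unfold pvRowA pvRowN
    rw [PySem.List.pyRange_zero_natCast c, List.flatMap_map]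
    apply List.flatMap_congr
    intro Y _
    have h1 : (X : Int) * (c : Int) + (Y : Int) = ((X * c + Y : Nat) : Int) := by push_cast; ring
    rw [h1, PySem.List.pyGet?_natCast, ← List.getD_eq_getElem?_getD]
  rw [PySem.List.pyRange_zero_natCast r, List.flatMap_map]
  apply List.flatMap_congr
  intro X _
  rw [hrow X]

-- Nat-indexed form of B
lemma pvB_flatN (m : List Int) (r c : Nat) :
    Inverse_sample_alt m ((r : Int), (c : Int)) =
      (List.range (4 * r * c)).map
        (fun s => m.getD (s / (2 * c) / 2 * c + s % (2 * c) / 2) 0) := by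
  unfold Inverse_sample_alt
  have h4 : (4 : Int) * (r : Int) * (c : Int) = ((4 * r * c : Nat) : Int) := by push_cast; ring
  simp only []
  rw [h4, PySem.List.pyRange_zero_natCast (4 * r * c), List.map_map]
  apply List.map_congr_left
  intro s _
  simp only [Function.comp]
  have hw : (2 : Int) * (c : Int) = ((2 * c : Nat) : Int) := by push_cast; ring
  rw [hw]
  rw [PySem.Int.floordiv_natCast s (2 * c), PySem.Int.mod_natCast s (2 * c)]
  rw [show ((2 : Int) = ((2 : Nat) : Int)) from rfl]
  rw [PySem.Int.floordiv_natCast (s / (2 * c)) 2, PySem.Int.floordiv_natCast (s % (2 * c)) 2]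
  have hidx : ((s / (2 * c) / 2 : Nat) : Int) * (c : Int) + ((s % (2 * c) / 2 : Nat) : Int)
      = ((s / (2 * c) / 2 * c + s % (2 * c) / 2 : Nat) : Int) := by push_cast; ring
  rw [hidx, PySem.List.pyGet?_natCast, ← List.getD_eq_getElem?_getD]

-- range over a product splits into blocks
lemma pvRangeMul {α : Type} (n k : Nat) (f : Nat → α) :
    (List.range (n * k)).map f
      = (List.range n).flatMap (fun q => (List.range k).map (fun s => f (q * k + s))) := by
  induction n with
  | zero => simp
  | succ n ih =>
    have h : (n + 1) * k = n * k + k := by ring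
    rw [h, List.range_add, List.map_append, ih, List.range_succ, List.flatMap_append]
    simp [List.map_map, Function.comp]

-- a doubled range read through s / 2 is a flatMap of pairs
lemma pvRangeDouble (k : Nat) (g : Nat → Int) :
    (List.range (2 * k)).map (fun s => g (s / 2))
      = (List.range k).flatMap (fun Y => [g Y, g Y]) := by
  induction k with
  | zero => simp
  | succ k ih =>
    have h : 2 * (k + 1) = 2 * k + 2 := by ring
    have h0 : (2 * k) / 2 = k := by omega
    have h2 : (2 * k + 1) / 2 = k := by omega
    rw [h, List.range_add, List.map_append, ih]
    rw [show List.range 2 = [0, 1] from rfl]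
    simp [List.range_succ, h0, h2]

-- B's closed-form index agrees with A's row addressing, per row
lemma pvRowEq (m : List Int) (c X : Nat) :
    (List.range (4 * c)).map
        (fun s => m.getD ((X * (4 * c) + s) / (2 * c) / 2 * c + (X * (4 * c) + s) % (2 * c) / 2) 0)
      = pvRowN m c X ++ pvRowN m c X := by
  rw [show 4 * c = 2 * c + 2 * c from by ring, List.range_add, List.map_append, List.map_map]
  have hfirst : ∀ s ∈ List.range (2 * c),
      m.getD ((X * (2 * c + 2 * c) + s) / (2 * c) / 2 * c + (X * (2 * c + 2 * c) + s) % (2 * c) / 2) 0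
        = m.getD (X * c + s / 2) 0 := by
    intro s hs
    rw [List.mem_range] at hs
    have hc : 0 < 2 * c := by omega
    rw [show X * (2 * c + 2 * c) + s = (2 * c) * (2 * X) + s from by ring,
        Nat.mul_add_div hc, Nat.mul_add_mod,
        Nat.div_eq_of_lt hs, Nat.mod_eq_of_lt hs,
        show (2 * X + 0) / 2 = X from by omega]
  have hsecond : ∀ s ∈ List.range (2 * c),
      m.getD ((X * (2 * c + 2 * c) + (2 * c + s)) / (2 * c) / 2 * c
              + (X * (2 * c + 2 * c) + (2 * c + s)) % (2 * c) / 2) 0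
        = m.getD (X * c + s / 2) 0 := by
    intro s hs
    rw [List.mem_range] at hs
    have hc : 0 < 2 * c := by omega
    rw [show X * (2 * c + 2 * c) + (2 * c + s) = (2 * c) * (2 * X + 1) + s from by ring,
        Nat.mul_add_div hc, Nat.mul_add_mod,
        Nat.div_eq_of_lt hs, Nat.mod_eq_of_lt hs,
        show (2 * X + 1 + 0) / 2 = X from by omega]
  have e1 := List.map_congr_left hfirst
  have e2 : (List.range (2 * c)).map
      ((fun s => m.getD ((X * (2 * c + 2 * c) + s) / (2 * c) / 2 * c
                         + (X * (2 * c + 2 * c) + s) % (2 * c) / 2) 0) ∘ (fun x => 2 * c + x))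
      = (List.range (2 * c)).map (fun s => m.getD (X * c + s / 2) 0) := by
    apply List.map_congr_left
    intro s hs
    simp only [Function.comp_apply]
    exact hsecond s hs
  rw [e1, e2]
  have h3 : (List.range (2 * c)).map (fun s => m.getD (X * c + s / 2) 0) = pvRowN m c X := by
    simpa [pvRowN] using pvRangeDouble c (fun Y => m.getD (X * c + Y) 0)
  rw [h3]

-- the main case: nonnegative dimensions
lemma pvMain (m : List Int) (r c : Nat) :
    Inverse_sample m ((r : Int), (c : Int)) = Inverse_sample_alt m ((r : Int), (c : Int)) := by
  rw [pvA_flatN, pvB_flatN]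
  rw [show 4 * r * c = r * (4 * c) from by ring, pvRangeMul r (4 * c)]
  apply List.flatMap_congr
  intro X _
  exact (pvRowEq m c X).symm

-- empty cases
lemma pvA_nil_rows (m : List Int) (size : Int × Int) (h : size.1 ≤ 0) :
    Inverse_sample m size = [] := by
  rw [pvA_flat]
  have : PySem.List.pyRange 0 size.1 1 = [] := by
    rw [PySem.List.pyRange_one]
    have : (size.1 - 0).toNat = 0 := by omega
    rw [this]; rfl
  rw [this]; rfl

lemma pvA_nil_cols (m : List Int) (size : Int × Int) (h : size.2 ≤ 0) :
    Inverse_sample m size = [] := by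
  rw [pvA_flat]
  have hrow : ∀ X : Int, pvRowA m size.2 X = [] := by
    intro X
    unfold pvRowA
    have : PySem.List.pyRange 0 size.2 1 = [] := by
      rw [PySem.List.pyRange_one]
      have : (size.2 - 0).toNat = 0 := by omega
      rw [this]; rfl
    rw [this]; rfl
  calc (PySem.List.pyRange 0 size.1 1).flatMap (fun X => pvRowA m size.2 X ++ pvRowA m size.2 X)
      = (PySem.List.pyRange 0 size.1 1).flatMap (fun _ => ([] : List Int)) := by
        apply List.flatMap_congr; intro X _; rw [hrow X]; rfl
    _ = [] := by simp

lemma pvB_nil (m : List Int) (size : Int × Int) (h : 4 * size.1 * size.2 ≤ 0) :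
    Inverse_sample_alt m size = [] := by
  unfold Inverse_sample_alt
  simp only []
  have : PySem.List.pyRange 0 (4 * size.1 * size.2) 1 = [] := by
    rw [PySem.List.pyRange_one]
    have : (4 * size.1 * size.2 - 0).toNat = 0 := by omega
    rw [this]; rfl
  rw [this]; rfl

-- ===== VERDICT (by name: the statement is the Claim_ definition above) =====
theorem Inverse_sample_spec : Claim_equal_Inverse_sample := by
  intro m size _hdom hpre
  unfold Spec_Inverse_sample
  obtain ⟨hquad, _⟩ := hpre
  by_cases hr : size.1 ≤ 0
  · by_cases hc : size.2 < 0
    · -- then size.1 = 0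
      have hr0 : size.1 = 0 := by omega
      rw [pvA_nil_rows m size hr, pvB_nil m size (by rw [hr0]; ring_nf; omega)]
    · rw [pvA_nil_rows m size hr, pvB_nil m size (by nlinarith)]
  · by_cases hc : size.2 ≤ 0
    · rw [pvA_nil_cols m size hc, pvB_nil m size (by nlinarith)]
    · obtain ⟨r, hrEq⟩ : ∃ r : Nat, size.1 = (r : Int) := ⟨size.1.toNat, by omega⟩
      obtain ⟨c, hcEq⟩ : ∃ c : Nat, size.2 = (c : Int) := ⟨size.2.toNat, by omega⟩
      have hsize : size = ((r : Int), (c : Int)) := by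
        cases size; simp_all
      rw [hsize]
      exact pvMain m r c
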